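-- pv_equiv track=rewrite | github.com/JakubBilski/tonations-recognition | src/tonation_recognition.py | remove_solitary_chords
-- ===== SOURCE A (Python) =====
-- def remove_solitary_chords(chord_types):
--     if len(chord_types) < 2:
--         return chord_types
--     result = []
--     if chord_types[0] == chord_types[1]:
--         result.append(chord_types[0])
--     for i in range(1, len(chord_types)-1):
--         chord = chord_types[i]
--         if chord_types[i-1] == chord or chord == chord_types[i+1]:
--             result.append(chord)
--     if chord_types[-1] == chord_types[-2]:
--         result.append(chord_types[-1])
--     return result
-- ===== SOURCE B (Python) =====
-- def remove_solitary_chords(chord_types):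
--     if len(chord_types) < 2:
--         return chord_types
--     result = []
--     run = []
--     for chord in chord_types:
--         if run and run[-1] == chord:
--             run.append(chord)
--         else:
--             if len(run) >= 2:
--                 result.extend(run)
--             run = [chord]
--     if len(run) >= 2:
--         result.extend(run)
--     return result
-- ===== Notes on version B (the rewrite author's own statement) =====
-- stated objective: alternative
-- what changed: B replaces A's per-index left/right neighbor tests (chord_types[i-1]/[i]/[i+1]) with a single run-grouping pass: it accumulates maximal runs of consecutive equal chords and keeps a run's elements iff the run has length >= 2.
import Mathlib
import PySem

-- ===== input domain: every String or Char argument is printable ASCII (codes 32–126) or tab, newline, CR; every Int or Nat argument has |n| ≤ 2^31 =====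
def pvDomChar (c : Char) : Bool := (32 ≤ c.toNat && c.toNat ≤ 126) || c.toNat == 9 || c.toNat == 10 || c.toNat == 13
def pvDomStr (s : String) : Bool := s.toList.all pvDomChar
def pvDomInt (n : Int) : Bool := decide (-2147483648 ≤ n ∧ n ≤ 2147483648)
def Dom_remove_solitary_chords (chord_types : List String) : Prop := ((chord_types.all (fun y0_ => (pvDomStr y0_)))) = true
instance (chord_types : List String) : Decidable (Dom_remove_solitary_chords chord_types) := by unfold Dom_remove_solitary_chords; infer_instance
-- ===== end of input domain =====

-- B replaces A's index-by-index left/right neighbor tests with a single run-grouping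
-- pass (a chord has an equal neighbor iff it lies in a maximal run of length ≥ 2);
-- same return value, same cost, different decomposition.

-- ===== PORT A =====
def remove_solitary_chords (chord_types : List String) : List String :=
  if chord_types.length < 2 then chord_types
  else
    let result : List String :=
      if PySem.List.pyGetD chord_types 0 "" = PySem.List.pyGetD chord_types 1 "" then
        [PySem.List.pyGetD chord_types 0 ""]
      else []
    let result := (PySem.List.pyRange 1 ((chord_types.length : Int) - 1) 1).foldl
      (fun result i =>
        let chord := PySem.List.pyGetD chord_types i ""
        if PySem.List.pyGetD chord_types (i - 1) "" = chord ∨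
           chord = PySem.List.pyGetD chord_types (i + 1) "" then
          result ++ [chord]
        else result) result
    if PySem.List.pyGetD chord_types (-1) "" = PySem.List.pyGetD chord_types (-2) "" then
      result ++ [PySem.List.pyGetD chord_types (-1) ""]
    else result

-- ===== PORT B =====
-- 'if len(run) >= 2: result.extend(run)'
def rscFlush (result run : List String) : List String :=
  if 2 ≤ run.length then result ++ run else result

def remove_solitary_chords_alt (chord_types : List String) : List String :=
  if chord_types.length < 2 then chord_types
  else
    let st := chord_types.foldl
      (fun (st : List String × List String) chord =>
        match st.2.getLast? with      -- 'if run and run[-1] == chord'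
        | some last =>
          if last = chord then (st.1, st.2 ++ [chord])
          else (rscFlush st.1 st.2, [chord])
        | none => (st.1, [chord])) ([], [])
    rscFlush st.1 st.2

-- ===== PRECONDITION & SPEC =====
def Spec_remove_solitary_chords (chord_types : List String) (out : List String) : Prop := out = remove_solitary_chords_alt chord_types
instance (chord_types : List String) (out : List String) : Decidable (Spec_remove_solitary_chords chord_types out) := by unfold Spec_remove_solitary_chords; infer_instance

-- ===== CLAIM (what is proved, stated in full; the proofs are below) =====
def Claim_equal_remove_solitary_chords : Prop := ∀ (chord_types : List String), Dom_remove_solitary_chords chord_types → Spec_remove_solitary_chords chord_types (remove_solitary_chords chord_types)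

-- ===== LEMMAS AND PROOFS =====

/-- Common reference function: kept elements among `x :: zs` when the element
just before `x` is `prev` and the list ends with `zs`'s last element. -/
def rscCore : String → List String → List String
  | _, [] => []
  | prev, [x] => if prev = x then [x] else []
  | prev, x :: y :: zs => (if prev = x ∨ x = y then [x] else []) ++ rscCore x (y :: zs)

lemma getLast?_replicate_pos (k : Nat) (r : String) (h : 1 ≤ k) :
    (List.replicate k r).getLast? = some r := by
  induction k with
  | zero => omega
  | succ n ih =>
    rcases Nat.eq_zero_or_pos n with h0 | h0
    · subst h0; rfl
    · rw [List.replicate_succ, List.getLast?_cons, ih h0]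
      cases n with
      | zero => omega
      | succ m => simp

/-- Invariant of B's fold: state `(result, replicate k r)` with `k ≥ 1`. -/
lemma rscB_inv (rest : List String) : ∀ (k : Nat) (r : String) (result : List String), 1 ≤ k →
    rscFlush
      (rest.foldl
        (fun (st : List String × List String) chord =>
          match st.2.getLast? with
          | some last =>
            if last = chord then (st.1, st.2 ++ [chord])
            else (rscFlush st.1 st.2, [chord])
          | none => (st.1, [chord])) (result, List.replicate k r)).1
      (rest.foldl
        (fun (st : List String × List String) chord =>
          match st.2.getLast? with
          | some last =>
            if last = chord then (st.1, st.2 ++ [chord])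
            else (rscFlush st.1 st.2, [chord])
          | none => (st.1, [chord])) (result, List.replicate k r)).2
    = result ++ (if 2 ≤ k ∨ rest.head? = some r then List.replicate k r else [])
        ++ rscCore r rest := by
  induction rest with
  | nil =>
    intro k r result hk
    simp only [List.foldl_nil, rscFlush, rscCore, List.length_replicate, List.head?_nil]
    split_ifs with h1 h2 <;> simp_all <;> omega
  | cons x t ih =>
    intro k r result hk
    simp only [List.foldl_cons, getLast?_replicate_pos k r hk]
    by_cases hrx : r = x
    · subst hrx
      rw [if_pos rfl]
      have hrep : List.replicate k r ++ [r] = List.replicate (k + 1) r := by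
        simp [List.replicate_succ']
      rw [hrep, ih (k + 1) r result (by omega)]
      have h2 : 2 ≤ k + 1 ∨ t.head? = some r := Or.inl (by omega)
      rw [if_pos h2, if_pos (Or.inr (show (r :: t).head? = some r from rfl))]
      cases t with
      | nil =>
        rw [show rscCore r ([] : List String) = [] from rfl,
            show rscCore r [r] = [r] from by simp [rscCore], List.append_nil, ← hrep]
        simp [List.append_assoc]
      | cons y t' =>
        rw [show rscCore r (r :: y :: t') = [r] ++ rscCore r (y :: t') from by
              simp [rscCore], ← hrep]
        simp [List.append_assoc]
    · have ih1 := ih 1 x (rscFlush result (List.replicate k r)) (by omega)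
      simp only [List.replicate_one] at ih1
      rw [if_neg hrx, ih1]
      simp only [rscFlush, List.length_replicate]
      cases t with
      | nil =>
        by_cases hk2 : 2 ≤ k <;>
          simp [rscCore, hk2, hrx, Ne.symm hrx]
      | cons y t' =>
        by_cases hxy : x = y
        · subst hxy
          by_cases hk2 : 2 ≤ k <;>
            simp [rscCore, hk2, hrx, Ne.symm hrx, List.append_assoc]
        · by_cases hk2 : 2 ≤ k <;>
            simp [rscCore, hk2, hrx, Ne.symm hrx, hxy, Ne.symm hxy, List.append_assoc]

/-- Invariant of A's fold+tail over the suffix `prev :: x :: zs` of the full list. -/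
lemma rscA_inv (zs : List String) : ∀ (u : List String) (prev x : String) (acc : List String),
    (if PySem.List.pyGetD (u ++ prev :: x :: zs) (-1) ""
        = PySem.List.pyGetD (u ++ prev :: x :: zs) (-2) "" then
      ((PySem.List.pyRange ((u.length : Int) + 1)
          (((u ++ prev :: x :: zs).length : Int) - 1) 1).foldl
        (fun result i =>
          let chord := PySem.List.pyGetD (u ++ prev :: x :: zs) i ""
          if PySem.List.pyGetD (u ++ prev :: x :: zs) (i - 1) "" = chord ∨
             chord = PySem.List.pyGetD (u ++ prev :: x :: zs) (i + 1) "" then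
            result ++ [chord]
          else result) acc) ++ [PySem.List.pyGetD (u ++ prev :: x :: zs) (-1) ""]
    else
      (PySem.List.pyRange ((u.length : Int) + 1)
          (((u ++ prev :: x :: zs).length : Int) - 1) 1).foldl
        (fun result i =>
          let chord := PySem.List.pyGetD (u ++ prev :: x :: zs) i ""
          if PySem.List.pyGetD (u ++ prev :: x :: zs) (i - 1) "" = chord ∨
             chord = PySem.List.pyGetD (u ++ prev :: x :: zs) (i + 1) "" then
            result ++ [chord]
          else result) acc)
    = acc ++ rscCore prev (x :: zs) := by
  induction zs with
  | nil =>
    intro u prev x acc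
    have hlen : (u ++ prev :: x :: ([] : List String)).length = u.length + 2 := by simp
    have hrange : PySem.List.pyRange ((u.length : Int) + 1)
        (((u ++ prev :: x :: ([] : List String)).length : Int) - 1) 1 = [] := by
      apply PySem.List.pyRange_one_eq_nil
      rw [hlen]; push_cast; omega
    have hm1 : PySem.List.pyGetD (u ++ prev :: x :: ([] : List String)) (-1) "" = x := by
      have h1 : u ++ prev :: x :: ([] : List String) = (u ++ [prev]) ++ [x] := by simp
      simp only [PySem.List.pyGetD]
      rw [h1, PySem.List.pyGet?_neg_one_append_singleton]
      rfl
    have hm2 : PySem.List.pyGetD (u ++ prev :: x :: ([] : List String)) (-2) "" = prev := by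
      have h2 : (2 : Nat) ≤ (u ++ prev :: x :: ([] : List String)).length := by simp
      simp only [PySem.List.pyGetD]
      rw [PySem.List.pyGet?_neg_ofNat _ 2 (by omega) h2, hlen]
      simp
    rw [hrange, hm1, hm2]
    simp only [List.foldl_nil, rscCore]
    rcases eq_or_ne prev x with h | h
    · simp [h]
    · simp [h, Ne.symm h]
  | cons y zs' ih =>
    intro u prev x acc
    have hlen : (u ++ prev :: x :: y :: zs').length = u.length + 3 + zs'.length := by
      simp; omega
    have hcons : PySem.List.pyRange ((u.length : Int) + 1)
        (((u ++ prev :: x :: y :: zs').length : Int) - 1) 1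
        = ((u.length : Int) + 1) :: PySem.List.pyRange ((u.length : Int) + 1 + 1)
            (((u ++ prev :: x :: y :: zs').length : Int) - 1) 1 := by
      apply PySem.List.pyRange_one_cons
      rw [hlen]; push_cast; omega
    have gp : PySem.List.pyGetD (u ++ prev :: x :: y :: zs') ((u.length : Int) + 1 - 1) "" = prev := by
      have h0 : ((u.length : Int) + 1 - 1) = (u.length : Int) := by ring
      simp only [PySem.List.pyGetD]
      rw [h0, PySem.List.pyGet?_append_length]
      rfl
    have gx : PySem.List.pyGetD (u ++ prev :: x :: y :: zs') ((u.length : Int) + 1) "" = x := by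
      have h1 : u ++ prev :: x :: y :: zs' = (u ++ [prev]) ++ x :: y :: zs' := by simp
      have h2 : ((u.length : Int) + 1) = (((u ++ [prev]).length : Int)) := by
        simp
      simp only [PySem.List.pyGetD]
      rw [h1, h2, PySem.List.pyGet?_append_length]
      rfl
    have gy : PySem.List.pyGetD (u ++ prev :: x :: y :: zs') ((u.length : Int) + 1 + 1) "" = y := by
      have h1 : u ++ prev :: x :: y :: zs' = (u ++ [prev, x]) ++ y :: zs' := by simp
      have h2 : ((u.length : Int) + 1 + 1) = (((u ++ [prev, x]).length : Int)) := by
        simp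
        try ring
      simp only [PySem.List.pyGetD]
      rw [h1, h2, PySem.List.pyGet?_append_length]
      rfl
    have hstep := ih (u ++ [prev]) x y (if prev = x ∨ x = y then acc ++ [x] else acc)
    have hl : (((u ++ [prev]).length : Int) + 1) = ((u.length : Int) + 1 + 1) := by
      simp
      try ring
    rw [List.append_assoc, List.singleton_append] at hstep
    rw [hl] at hstep
    rw [hcons]
    simp only [List.foldl_cons, gp, gx, gy]
    rw [hstep]
    simp only [rscCore]
    split_ifs <;> simp [List.append_assoc]

-- ===== VERDICT (by name: the statement is the Claim_ definition above) =====
theorem remove_solitary_chords_spec : Claim_equal_remove_solitary_chords := by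
  intro chord_types _
  unfold Spec_remove_solitary_chords
  match chord_types with
  | [] => rfl
  | [a] => rfl
  | a :: b :: rest =>
    have hA := rscA_inv rest [] a b
      (if PySem.List.pyGetD (a :: b :: rest) 0 "" = PySem.List.pyGetD (a :: b :: rest) 1 "" then
        [PySem.List.pyGetD (a :: b :: rest) 0 ""] else [])
    have hB := rscB_inv (b :: rest) 1 a [] (by omega)
    simp only [List.nil_append, List.length_nil, Nat.cast_zero, zero_add] at hA
    simp only [List.replicate_one, List.head?_cons] at hB
    have hlen : ¬ ((a :: b :: rest).length < 2) := by simp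
    rw [remove_solitary_chords, remove_solitary_chords_alt, if_neg hlen, if_neg hlen]
    simp only []
    rw [hA]
    refine Eq.trans ?_ hB.symm
    have g0 : PySem.List.pyGetD (a :: b :: rest) 0 "" = a := by
      simp only [PySem.List.pyGetD, PySem.List.pyGet?, PySem.List.pyIdx?]
      rw [if_pos (le_refl (0:Int)), if_pos (show (0:Int) < ((a::b::rest).length:Int) by
        simp only [List.length_cons]; push_cast; omega)]
      simp
    have g1 : PySem.List.pyGetD (a :: b :: rest) 1 "" = b := by
      simp only [PySem.List.pyGetD, PySem.List.pyGet?, PySem.List.pyIdx?]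
      rw [if_pos (show (0:Int) ≤ 1 by norm_num), if_pos (show (1:Int) < ((a::b::rest).length:Int) by
        simp only [List.length_cons]; push_cast; omega)]
      simp
    rw [g0, g1]
    simp only [List.nil_append, Option.some.injEq]
    rcases eq_or_ne a b with h | h
    · simp [h]
    · simp [h, Ne.symm h]
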